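-- pv_equiv track=rewrite | github.com/PeterDziuba/Codeguild | Farkle/fark_funk.py | counter_tally
-- ===== SOURCE A (Python) =====
-- def counter_tally(scoring_list, counters):
-- 	"""This function uses the number counters to score the current hand."""
-- 	for i in scoring_list:
-- 		if i == 1: counters[0] += 1
-- 		elif i == 2: counters[1] += 1
-- 		elif i == 3: counters[2] += 1
-- 		elif i == 4: counters[3] += 1
-- 		elif i == 5: counters[4] += 1
-- 		elif i == 6: counters[5] += 1
-- 	return counters
-- ===== SOURCE B (Python) =====
-- def counter_tally(scoring_list, counters):
--     """Tally dice values 1-6 into counters via per-value counts (returns a new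
--     list; unlike A it does not mutate counters in place -- return value only)."""
--     return [c + scoring_list.count(idx + 1) if idx < 6 else c
--             for idx, c in enumerate(counters)]
-- ===== Notes on version B (the rewrite author's own statement) =====
-- stated objective: idiomatic
-- what changed: Replaces the per-element six-way if/elif dispatch loop mutating counters with a single comprehension over enumerate(counters) that adds scoring_list.count(idx+1) to each of the first six slots (return value only: B builds a new list instead of mutating counters in place).
import Mathlib
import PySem

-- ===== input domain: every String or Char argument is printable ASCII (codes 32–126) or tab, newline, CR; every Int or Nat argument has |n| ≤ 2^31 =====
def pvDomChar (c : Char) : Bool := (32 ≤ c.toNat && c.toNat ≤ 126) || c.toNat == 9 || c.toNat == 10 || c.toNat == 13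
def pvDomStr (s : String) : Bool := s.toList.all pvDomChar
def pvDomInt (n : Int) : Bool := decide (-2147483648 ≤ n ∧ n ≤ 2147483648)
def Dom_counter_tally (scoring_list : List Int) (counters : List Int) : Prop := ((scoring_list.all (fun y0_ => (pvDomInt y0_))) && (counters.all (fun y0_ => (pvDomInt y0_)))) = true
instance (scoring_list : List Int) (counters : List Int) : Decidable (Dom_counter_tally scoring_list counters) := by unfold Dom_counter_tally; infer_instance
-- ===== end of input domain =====

-- B replaces A's per-element six-way if/elif mutation loop with one comprehension
-- over enumerate(counters) adding count(idx+1) per slot (return value only: B does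
-- not mutate counters in place as A does).


-- ===== PORT A =====
-- counters[j] += 1 (in range under Pre_; Python raises IndexError out of range)
def pvIncAt (l : List Int) (j : Nat) : List Int := l.set j (l.getD j 0 + 1)

-- loop body of A: the six-way if/elif dispatch
def pvStep (acc : List Int) (i : Int) : List Int :=
  if i = 1 then pvIncAt acc 0
  else if i = 2 then pvIncAt acc 1
  else if i = 3 then pvIncAt acc 2
  else if i = 4 then pvIncAt acc 3
  else if i = 5 then pvIncAt acc 4
  else if i = 6 then pvIncAt acc 5
  else acc

def counter_tally (scoring_list : List Int) (counters : List Int) : List Int :=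
  scoring_list.foldl pvStep counters

-- ===== PORT B =====
def counter_tally_alt (scoring_list : List Int) (counters : List Int) : List Int :=
  (PySem.List.enumerate counters).map (fun p =>
    if p.1 < 6 then p.2 + (PySem.List.count scoring_list (p.1 + 1) : Int) else p.2)

-- ===== PRECONDITION & SPEC =====
-- Pre_ excludes exactly the inputs where A raises IndexError: a die value k in 1..6
-- present in scoring_list whose slot k-1 does not exist in counters.
def Pre_counter_tally (scoring_list : List Int) (counters : List Int) : Prop :=
  ∀ i ∈ scoring_list, 1 ≤ i → i ≤ 6 → i - 1 < (counters.length : Int)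
instance (scoring_list : List Int) (counters : List Int) : Decidable (Pre_counter_tally scoring_list counters) := by unfold Pre_counter_tally; infer_instance

def pvWitness_counter_tally : List Int × List Int := ([1, 2, 6, 6, 9], [0, 0, 0, 0, 0, 0])

def Spec_counter_tally (scoring_list : List Int) (counters : List Int) (out : List Int) : Prop := out = counter_tally_alt scoring_list counters
instance (scoring_list : List Int) (counters : List Int) (out : List Int) : Decidable (Spec_counter_tally scoring_list counters out) := by unfold Spec_counter_tally; infer_instance

-- ===== CLAIM (what is proved, stated in full; the proofs are below) =====
def Claim_equal_counter_tally : Prop := ∀ (scoring_list : List Int) (counters : List Int), Dom_counter_tally scoring_list counters → Pre_counter_tally scoring_list counters → Spec_counter_tally scoring_list counters (counter_tally scoring_list counters)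


-- ===== LEMMAS AND PROOFS =====

theorem length_pvStep (c : List Int) (i : Int) : (pvStep c i).length = c.length := by
  unfold pvStep
  split_ifs <;> simp [pvIncAt]

theorem length_counter_tally (s : List Int) : ∀ c : List Int, (counter_tally s c).length = c.length := by
  induction s with
  | nil => intro c; rfl
  | cons i s ih =>
    intro c
    show (counter_tally s (pvStep c i)).length = _
    rw [ih, length_pvStep]

theorem getD_pvIncAt (c : List Int) (m j : Nat) (hj : j < c.length) :
    (pvIncAt c m).getD j 0 = c.getD j 0 + (if m = j then 1 else 0) := by
  simp only [pvIncAt, List.getD_eq_getElem?_getD, List.getElem?_set]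
  split_ifs with h hlt
  · subst h; simp [List.getElem?_eq_getElem hj]
  · exact absurd hj (h ▸ hlt)
  · simp

-- per-index characterisation of A's fold: slot j accumulates the count of value j+1
theorem getD_counter_tally (s : List Int) : ∀ (c : List Int) (j : Nat), j < c.length →
    (counter_tally s c).getD j 0 = c.getD j 0 + (if (j : Int) < 6 then (s.count ((j : Int) + 1) : Int) else 0) := by
  induction s with
  | nil => intro c j _; simp [counter_tally]
  | cons i s ih =>
    intro c j hj
    show (counter_tally s (pvStep c i)).getD j 0 = _
    have hj' : j < (pvStep c i).length := by rw [length_pvStep]; exact hj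
    rw [ih _ j hj']
    unfold pvStep
    split_ifs with h1 h2 h3 h4 h5 h6 <;>
      (try rw [getD_pvIncAt c _ j hj]) <;>
      (try simp only [List.count_cons]) <;>
      split_ifs <;> push_cast <;> (try simp_all) <;> omega

theorem getD_counter_tally_alt (s c : List Int) (j : Nat) (hj : j < c.length) :
    (counter_tally_alt s c).getD j 0 = c.getD j 0 + (if (j : Int) < 6 then (s.count ((j : Int) + 1) : Int) else 0) := by
  have hlen : j < (counter_tally_alt s c).length := by
    simpa [counter_tally_alt, PySem.List.length_enumerate] using hj
  rw [List.getD_eq_getElem?_getD, List.getElem?_eq_getElem hlen]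
  simp only [counter_tally_alt, List.getElem_map, PySem.List.getElem_enumerate]
  rw [List.getD_eq_getElem?_getD, List.getElem?_eq_getElem hj]
  simp [PySem.List.count_eq]
  split_ifs <;> simp

-- ===== VERDICT (by name: the statement is the Claim_ definition above) =====
theorem counter_tally_spec : Claim_equal_counter_tally := by
  intro s c _ _
  show counter_tally s c = counter_tally_alt s c
  have hA := length_counter_tally s c
  have hB : (counter_tally_alt s c).length = c.length := by
    simp [counter_tally_alt, PySem.List.length_enumerate]
  apply List.ext_getElem (by omega)
  intro j hj1 hj2
  have hjc : j < c.length := by omega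
  have h1 := getD_counter_tally s c j hjc
  have h2 := getD_counter_tally_alt s c j hjc
  rw [List.getD_eq_getElem?_getD, List.getElem?_eq_getElem hj1] at h1
  rw [List.getD_eq_getElem?_getD, List.getElem?_eq_getElem hj2] at h2
  simp only [Option.getD_some] at h1 h2
  rw [h1, h2]
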